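-- pv_equiv track=rewrite | github.com/chansoli/NatGen | src/data_preprocessors/transformations/inline_snippet_inserter.py | _indent_for_body
-- ===== SOURCE A (Python) =====
-- def _indent_for_body(code: str, brace_index: int) -> str:
--     # Find the indentation level immediately after the opening brace
--     newline_pos = code.rfind("\n", 0, brace_index + 1)
--     if newline_pos == -1:
--         return "    "
--     indent = []
--     i = newline_pos + 1
--     while i < len(code) and code[i] in (" ", "\t"):
--         indent.append(code[i])
--         i += 1
--     # default to 4 spaces if no indent detected
--     return "".join(indent) if indent else "    "
-- ===== SOURCE B (Python) =====
-- def _indent_for_body(code: str, brace_index: int) -> str: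
--     # Find the indentation level immediately after the opening brace
--     newline_pos = code.rfind("\n", 0, brace_index + 1)
--     if newline_pos == -1:
--         return "    "
--     line = code[newline_pos + 1:]
--     indent = line[: len(line) - len(line.lstrip(" \t"))]
--     # default to 4 spaces if no indent detected
--     return indent or "    "
-- ===== Notes on version B (the rewrite author's own statement) =====
-- stated objective: idiomatic
-- what changed: The char-by-char index loop that appends indentation characters to a list is replaced by a one-shot extraction: slice the line after the newline and take its leading run of ' '/' ' via lstrip-length arithmetic, with `indent or " "` as the default.
import Mathlib
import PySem

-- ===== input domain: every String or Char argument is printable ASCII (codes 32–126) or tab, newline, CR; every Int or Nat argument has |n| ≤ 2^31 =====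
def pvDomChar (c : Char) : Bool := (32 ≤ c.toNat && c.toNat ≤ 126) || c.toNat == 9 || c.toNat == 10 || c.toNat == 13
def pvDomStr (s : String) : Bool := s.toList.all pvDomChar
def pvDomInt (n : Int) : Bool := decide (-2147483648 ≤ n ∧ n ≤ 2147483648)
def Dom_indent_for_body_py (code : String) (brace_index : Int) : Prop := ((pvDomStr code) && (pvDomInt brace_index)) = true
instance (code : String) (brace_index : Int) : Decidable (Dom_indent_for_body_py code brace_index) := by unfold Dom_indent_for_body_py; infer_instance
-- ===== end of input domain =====

-- B replaces A's char-by-char accumulation loop with a one-shot slice + lstrip-length extraction of the leading ' '/'\t' run (idiomatic; return value only, neither mutates).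

-- ===== PORT A =====
-- the while loop 'while i < len(code) and code[i] in (" ", "\t"): indent.append(code[i]); i += 1'
-- transcribed as structural recursion over the remaining characters, with the same accumulator
def indentLoopA : List Char → List Char → List Char
  | acc, [] => acc
  | acc, c :: rest => if c = ' ' ∨ c = '\t' then indentLoopA (acc ++ [c]) rest else acc

def indent_for_body_py (code : String) (brace_index : Int) : String :=
  let newline_pos := PySem.Str.rfindFrom code "\n" 0 (some (brace_index + 1))
  if newline_pos = -1 then "    "
  else
    let indent := indentLoopA [] (code.toList.drop (newline_pos + 1).toNat)
    if indent ≠ [] then String.ofList indent else "    "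

-- ===== PORT B =====
def indent_for_body_py_alt (code : String) (brace_index : Int) : String :=
  let newline_pos := PySem.Str.rfindFrom code "\n" 0 (some (brace_index + 1))
  if newline_pos = -1 then "    "
  else
    let line := PySem.List.slice code.toList (some (newline_pos + 1)) none
    -- line.lstrip(" \t") ported by hand as dropWhile over the char set — exact for this two-char set
    let indent := line.take (line.length - (line.dropWhile (fun c => c == ' ' || c == '\t')).length)
    if indent.isEmpty then "    " else String.ofList indent

-- ===== PRECONDITION & SPEC =====
def Spec_indent_for_body_py (code : String) (brace_index : Int) (out : String) : Prop := out = indent_for_body_py_alt code brace_index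
instance (code : String) (brace_index : Int) (out : String) : Decidable (Spec_indent_for_body_py code brace_index out) := by unfold Spec_indent_for_body_py; infer_instance

-- ===== CLAIM (what is proved, stated in full; the proofs are below) =====
def Claim_equal_indent_for_body_py : Prop := ∀ (code : String) (brace_index : Int), Dom_indent_for_body_py code brace_index → Spec_indent_for_body_py code brace_index (indent_for_body_py code brace_index)

-- ===== LEMMAS AND PROOFS =====

theorem indentLoopA_eq_takeWhile (l acc : List Char) :
    indentLoopA acc l = acc ++ l.takeWhile (fun c => c == ' ' || c == '\t') := by
  induction l generalizing acc with
  | nil => simp [indentLoopA]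
  | cons c rest ih =>
    by_cases h : c = ' ' ∨ c = '\t'
    · have hb : (c == ' ' || c == '\t') = true := by
        rcases h with h | h <;> simp [h]
      simp [indentLoopA, h, List.takeWhile, hb, ih]
    · have hb : (c == ' ' || c == '\t') = false := by
        simp only [Bool.or_eq_false_iff, beq_eq_false_iff_ne]
        exact ⟨fun h1 => h (Or.inl h1), fun h2 => h (Or.inr h2)⟩
      simp [indentLoopA, h, List.takeWhile, hb]

theorem take_sub_dropWhile_eq_takeWhile (p : Char → Bool) (l : List Char) :
    l.take (l.length - (l.dropWhile p).length) = l.takeWhile p := by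
  induction l with
  | nil => simp
  | cons c rest ih =>
    by_cases h : p c
    · have hle := List.length_dropWhile_le p rest
      have : (c :: rest).length - ((c :: rest).dropWhile p).length
          = (rest.length - (rest.dropWhile p).length) + 1 := by
        simp [List.dropWhile, h]; omega
      rw [this, List.take_succ_cons, ih, List.takeWhile_cons_of_pos h]
    · simp [List.dropWhile, List.takeWhile, h]

theorem rfind_go_ge (s sub : List Char) : ∀ k, -1 ≤ PySem.Chars.rfind.go s sub k := by
  intro k; induction k with
  | zero => unfold PySem.Chars.rfind.go; split <;> omega
  | succ j ih => unfold PySem.Chars.rfind.go; split <;> [omega; exact ih]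

theorem rfindFrom_zero_ge (s sub : List Char) (e? : Option Int) :
    -1 ≤ PySem.Chars.rfindFrom s sub 0 e? := by
  unfold PySem.Chars.rfindFrom PySem.Chars.rfind
  dsimp only
  split_ifs <;> first | omega | (simp only [Int.zero_add]; exact rfind_go_ge _ _ _)

-- ===== VERDICT (by name: the statement is the Claim_ definition above) =====
theorem indent_for_body_py_spec : Claim_equal_indent_for_body_py := by
  intro code brace_index _
  unfold Spec_indent_for_body_py indent_for_body_py indent_for_body_py_alt
  simp only [PySem.Str.rfindFrom_eq]
  by_cases h : PySem.Chars.rfindFrom code.toList "\n".toList 0 (some (brace_index + 1)) = -1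
  · rw [if_pos h, if_pos h]
  · have hge : 0 ≤ PySem.Chars.rfindFrom code.toList "\n".toList 0 (some (brace_index + 1)) := by
      have := rfindFrom_zero_ge code.toList "\n".toList (some (brace_index + 1))
      omega
    have h0 : 0 ≤ PySem.Chars.rfindFrom code.toList "\n".toList 0 (some (brace_index + 1)) + 1 := by omega
    rw [if_neg h, if_neg h, PySem.List.slice_from _ h0,
      take_sub_dropWhile_eq_takeWhile, indentLoopA_eq_takeWhile, List.nil_append]
    cases (code.toList.drop (PySem.Chars.rfindFrom code.toList "\n".toList 0 (some (brace_index + 1)) + 1).toNat).takeWhile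
        (fun c => c == ' ' || c == '\t') <;> simp
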